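-- pv_equiv track=rewrite | github.com/starreeze/daily-arxiv | utils.py | find_first_json_block
-- ===== SOURCE A (Python) =====
-- def find_first_json_block(text: str) -> tuple[str, str]:
--     """Find the first complete JSON block in the text.
--
--     Args:
--         text (str): Input text containing JSON block(s)
--
--     Returns:
--         tuple[str, str]: (matched JSON block, remaining text)
--
--     Raises:
--         ValueError: If no valid JSON block is found or text is malformed
--     """
--     stack = []
--     start = -1
--
--     for i, char in enumerate(text):
--         if char in "[{":
--             if not stack:  # First opening bracket
--                 start = i
--             stack.append(char)
--         elif char in "]}":
--             if not stack:
--                 raise ValueError("Unmatched closing bracket")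
--
--             # Check if brackets match
--             if (char == "]" and stack[-1] == "[") or (char == "}" and stack[-1] == "{"):
--                 stack.pop()
--                 if not stack:  # Found complete block
--                     return text[start : i + 1], text[i + 1 :]
--             else:
--                 raise ValueError("Mismatched brackets")
--
--     if stack:
--         raise ValueError("Unclosed brackets")
--     raise ValueError("No JSON block found")
-- ===== SOURCE B (Python) =====
-- def _match(text, i):
--     """text[i] is an opening bracket; return the index of its matching closer."""
--     closer = "]" if text[i] == "[" else "}"
--     j = i + 1
--     while j < len(text):
--         ch = text[j]
--         if ch == closer:
--             return j
--         if ch in "]}":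
--             raise ValueError("Mismatched brackets")
--         if ch in "[{":
--             j = _match(text, j)
--         j += 1
--     raise ValueError("Unclosed brackets")
--
--
-- def find_first_json_block(text: str) -> tuple[str, str]:
--     """Recursive-descent version: locate the first opener, then match it."""
--     start = None
--     for i, ch in enumerate(text):
--         if ch in "[{":
--             start = i
--             break
--         if ch in "]}":
--             raise ValueError("Unmatched closing bracket")
--     if start is None:
--         raise ValueError("No JSON block found")
--     end = _match(text, start)
--     return text[start : end + 1], text[end + 1 :]
-- ===== Notes on version B (the rewrite author's own statement) =====
-- stated objective: alternative
-- what changed: Replaces A's single loop over an explicit bracket stack with a recursive-descent matcher: a scan finds the first opener, then a helper matches one opener at a time, recursing on each nested opener.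
import Mathlib
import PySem

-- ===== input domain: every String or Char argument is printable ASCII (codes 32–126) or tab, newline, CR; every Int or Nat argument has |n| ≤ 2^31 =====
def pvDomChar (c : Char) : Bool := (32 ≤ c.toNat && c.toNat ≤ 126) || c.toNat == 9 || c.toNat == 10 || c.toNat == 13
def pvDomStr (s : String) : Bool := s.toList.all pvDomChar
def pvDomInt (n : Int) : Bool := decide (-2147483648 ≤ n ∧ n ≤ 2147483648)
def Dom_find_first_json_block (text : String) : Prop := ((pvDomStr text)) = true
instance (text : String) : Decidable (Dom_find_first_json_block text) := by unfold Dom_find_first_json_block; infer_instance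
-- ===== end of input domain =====

-- B is a recursive-descent bracket matcher (helper that matches one opener, recursing on
-- nested openers) instead of A's single loop over an explicit bracket stack; same cost,
-- different decomposition. Neither program mutates its argument.

-- ===== PORT A =====
-- A's loop: index i over the text, stack of open brackets, start index (-1 until the
-- first opener); `none` = any of A's ValueError raises.
def findA (orig : List Char) : List Char → Nat → List Char → Int → Option (List Char × List Char)
  | [], _, _, _ => none
  | c :: cs, i, stack, start =>
    if c = '[' ∨ c = '{' then
      findA orig cs (i + 1) (c :: stack) (if stack = [] then (i : Int) else start)
    else if c = ']' ∨ c = '}' then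
      match stack with
      | [] => none
      | top :: rest =>
        if (c = ']' ∧ top = '[') ∨ (c = '}' ∧ top = '{') then
          if rest = [] then
            some (PySem.List.slice orig (some start) (some ((i : Int) + 1)),
                  PySem.List.slice orig (some ((i : Int) + 1)) none)
          else findA orig cs (i + 1) rest start
        else none
    else findA orig cs (i + 1) stack start

def find_first_json_block (text : String) : String × String :=
  match findA text.toList text.toList 0 [] (-1) with
  | some (blk, rest) => (String.ofList blk, String.ofList rest)
  | none => ("", "")

-- ===== PORT B =====
def closeOf (c : Char) : Char := if c = '[' then ']' else '}'

-- Source B's `_match`: scan for `closer`, recursing on a nested opener; returns the relative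
-- index of the matching closer, `none` = Mismatched/Unclosed raise.
def scanB (closer : Char) : List Char → Option Nat
  | [] => none
  | c :: cs =>
    if c = closer then some 0
    else if c = ']' ∨ c = '}' then none
    else if c = '[' ∨ c = '{' then
      match scanB (closeOf c) cs with
      | none => none
      | some m =>
        match scanB closer (cs.drop (m + 1)) with
        | none => none
        | some k => some (1 + (m + 1) + k)
    else
      match scanB closer cs with
      | none => none
      | some k => some (1 + k)
termination_by rest => rest.length
decreasing_by all_goals (simp; try omega)

-- Source B's top-level scan for the first bracket, then one `_match` call and the slices.
def goB (orig : List Char) : List Char → Nat → Option (List Char × List Char)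
  | [], _ => none
  | c :: cs, i =>
    if c = '[' ∨ c = '{' then
      match scanB (closeOf c) cs with
      | none => none
      | some m =>
        some (PySem.List.slice orig (some (i : Int)) (some (((i + 1 + m : Nat) : Int) + 1)),
              PySem.List.slice orig (some (((i + 1 + m : Nat) : Int) + 1)) none)
    else if c = ']' ∨ c = '}' then none
    else goB orig cs (i + 1)

def find_first_json_block_alt (text : String) : String × String :=
  match goB text.toList text.toList 0 with
  | some (blk, rest) => (String.ofList blk, String.ofList rest)
  | none => ("", "")

-- ===== PRECONDITION & SPEC =====
-- One cancellation step on the sequence of bracket characters (a matching closer cancels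
-- the top opener; anything else is pushed).
def pvRed (st : List Char) (c : Char) : List Char :=
  match st with
  | t :: r => if (c = ']' ∧ t = '[') ∨ (c = '}' ∧ t = '{') then r else c :: st
  | [] => [c]

-- Pre_ excludes exactly the inputs on which Python A raises ValueError (no bracket at all,
-- a closing bracket before the block completes the wrong way, mismatched or unclosed
-- brackets): A returns iff some nonempty prefix of the text's bracket characters cancels
-- to the empty stack (a well-formed bracket block).
def Pre_find_first_json_block (text : String) : Prop :=
  ∃ k, k < (text.toList.filter (fun c => c = '[' || c = ']' || c = '{' || c = '}')).length + 1 ∧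
    0 < k ∧
    ((text.toList.filter (fun c => c = '[' || c = ']' || c = '{' || c = '}')).take k).foldl pvRed [] = []
instance (text : String) : Decidable (Pre_find_first_json_block text) := by
  unfold Pre_find_first_json_block; infer_instance

def pvWitness_find_first_json_block : String := "x = [1, {\"a\": 2}] tail"

def Spec_find_first_json_block (text : String) (out : String × String) : Prop := out = find_first_json_block_alt text
instance (text : String) (out : String × String) : Decidable (Spec_find_first_json_block text out) := by unfold Spec_find_first_json_block; infer_instance

-- ===== CLAIM (what is proved, stated in full; the proofs are below) =====
def Claim_equal_find_first_json_block : Prop := ∀ (text : String), Dom_find_first_json_block text → Pre_find_first_json_block text → Spec_find_first_json_block text (find_first_json_block text)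

-- ===== LEMMAS AND PROOFS =====

-- A's loop with a nonempty stack behaves like one `scanB` call for the top opener,
-- followed by the loop on the rest of the stack (the ports agree on ALL inputs, raising
-- branches included, so the claim's Pre_ hypothesis is not needed by the proof).
theorem findA_cons (n : Nat) : ∀ (cs : List Char), cs.length ≤ n →
    ∀ (orig : List Char) (i : Nat) (s : Char) (ss : List Char) (start : Int),
    (s = '[' ∨ s = '{') →
    findA orig cs i (s :: ss) start =
      match scanB (closeOf s) cs with
      | none => none
      | some m =>
        if ss = [] then
          some (PySem.List.slice orig (some start) (some (((i + m : Nat) : Int) + 1)),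
                PySem.List.slice orig (some (((i + m : Nat) : Int) + 1)) none)
        else findA orig (cs.drop (m + 1)) (i + m + 1) ss start := by
  induction n with
  | zero =>
    intro cs hcs orig i s ss start hs
    have h : cs = [] := List.eq_nil_of_length_eq_zero (Nat.le_zero.mp hcs)
    subst h
    simp [findA, scanB]
  | succ n ih =>
    intro cs hcs orig i s ss start hs
    match cs with
    | [] => simp [findA, scanB]
    | c :: cs =>
      simp only [List.length_cons, Nat.succ_le_succ_iff] at hcs
      have hclose : closeOf s = ']' ∨ closeOf s = '}' := by
        rcases hs with h | h <;> simp [closeOf, h]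
      by_cases hc1 : c = '[' ∨ c = '{'
      · -- c is an opening bracket
        have hnc2 : ¬(c = ']' ∨ c = '}') := by rcases hc1 with h | h <;> subst h <;> decide
        have hne : ¬(c = closeOf s) := by
          rcases hclose with h | h <;> rw [h] <;> rcases hc1 with h2 | h2 <;> subst h2 <;> decide
        rw [show findA orig (c :: cs) i (s :: ss) start
              = findA orig cs (i + 1) (c :: s :: ss) start from by simp [findA, hc1]]
        rw [ih cs hcs orig (i + 1) c (s :: ss) start hc1]
        rw [show scanB (closeOf s) (c :: cs)
              = (match scanB (closeOf c) cs with
                 | none => none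
                 | some m =>
                   match scanB (closeOf s) (cs.drop (m + 1)) with
                   | none => none
                   | some k => some (1 + (m + 1) + k)) from by
              rw [scanB]; simp [hne, hnc2, hc1]]
        cases hm : scanB (closeOf c) cs with
        | none => simp
        | some m =>
          simp only [reduceCtorEq]
          rw [ih (cs.drop (m + 1)) (by simp; omega) orig (i + 1 + m + 1) s ss start hs]
          cases hk : scanB (closeOf s) (cs.drop (m + 1)) with
          | none => simp
          | some k =>
            by_cases hss : ss = []
            · subst hss
              simp only []
              have e : i + 1 + m + 1 + k = i + (1 + (m + 1) + k) := by omega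
              rw [e]; simp
            · simp only [if_neg hss, List.drop_drop, List.drop_succ_cons]
              have e1 : m + 1 + (k + 1) = 1 + (m + 1) + k := by omega
              have e2 : i + 1 + m + 1 + k + 1 = i + (1 + (m + 1) + k) + 1 := by omega
              rw [e1, e2]; simp
      · -- c is not an opening bracket
        by_cases hc2 : c = ']' ∨ c = '}'
        · -- c is a closing bracket: A pops or raises, B's scan returns or raises here
          by_cases hcc : c = closeOf s
          · have hmatch : (c = ']' ∧ s = '[') ∨ (c = '}' ∧ s = '{') := by
              rcases hs with h | h <;> subst h <;> simp [closeOf] at hcc <;> simp [hcc]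
            rw [show scanB (closeOf s) (c :: cs) = some 0 from by rw [scanB]; simp [hcc]]
            by_cases hss : ss = []
            · subst hss; simp [findA, hc1, hc2, hmatch]
            · simp [findA, hc1, hc2, hmatch, hss]
          · have hnm : ¬((c = ']' ∧ s = '[') ∨ (c = '}' ∧ s = '{')) := by
              rcases hs with h | h <;> subst h <;> simp [closeOf] at hcc <;> simp [hcc]
            rw [show scanB (closeOf s) (c :: cs) = none from by rw [scanB]; simp [hcc, hc2]]
            simp [findA, hc1, hc2, hnm]
        · -- ordinary character: both sides skip it
          have hcc : ¬ c = closeOf s := by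
            intro h2; rw [h2] at hc2; exact hc2 hclose
          rw [show findA orig (c :: cs) i (s :: ss) start
                = findA orig cs (i + 1) (s :: ss) start from by simp [findA, hc1, hc2]]
          rw [ih cs hcs orig (i + 1) s ss start hs]
          rw [show scanB (closeOf s) (c :: cs)
                = (match scanB (closeOf s) cs with
                   | none => none
                   | some k => some (1 + k)) from by rw [scanB]; simp [hcc, hc2, hc1]]
          cases hm : scanB (closeOf s) cs with
          | none => simp
          | some m =>
            by_cases hss : ss = []
            · subst hss
              have e : i + 1 + m = i + (1 + m) := by omega
              simp [e]
            · have e2 : i + 1 + m + 1 = i + (1 + m) + 1 := by omega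
              have e3 : (1 : Nat) + m = m + 1 := by omega
              simp [hss, e2, e3]


theorem findA_goB : ∀ (cs : List Char) (orig : List Char) (i : Nat) (start : Int),
    findA orig cs i [] start = goB orig cs i := by
  intro cs
  induction cs with
  | nil => intro orig i start; simp [findA, goB]
  | cons c cs ih =>
    intro orig i start
    by_cases hc1 : c = '[' ∨ c = '{'
    · -- the first bracket: A pushes it onto the empty stack, B calls the matcher
      rw [show findA orig (c :: cs) i [] start
            = findA orig cs (i + 1) [c] (i : Int) from by simp [findA, hc1]]
      rw [findA_cons cs.length cs le_rfl orig (i + 1) c [] (i : Int) hc1]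
      rw [show goB orig (c :: cs) i
            = (match scanB (closeOf c) cs with
               | none => none
               | some m =>
                 some (PySem.List.slice orig (some (i : Int)) (some (((i + 1 + m : Nat) : Int) + 1)),
                       PySem.List.slice orig (some (((i + 1 + m : Nat) : Int) + 1)) none)) from by
            simp [goB, hc1]]
      cases hm : scanB (closeOf c) cs <;> simp
    · by_cases hc2 : c = ']' ∨ c = '}'
      · simp [findA, goB, hc1, hc2]
      · rw [show findA orig (c :: cs) i [] start
              = findA orig cs (i + 1) [] start from by simp [findA, hc1, hc2]]
        rw [ih orig (i + 1) start]
        simp [goB, hc1, hc2]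

-- ===== VERDICT (by name: the statement is the Claim_ definition above) =====
theorem find_first_json_block_spec : Claim_equal_find_first_json_block := by
  intro text _ _
  unfold Spec_find_first_json_block find_first_json_block find_first_json_block_alt
  rw [findA_goB]
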